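-- pv_equiv track=rewrite | github.com/elperrito/friends | myfriends.py | make_friends_directory
-- ===== SOURCE A (Python) =====
-- def make_friends_directory(pairs):
--     """Create a directory of persons, for looking up immediate friends
--
--     Args:
--         pairs (List[Tuple[str, str]]): list of pairs
--
--     Returns:
--         Dict[str, Set] where each key is a person, with value being the set of
--         related persons given in the input list of pairs
--
--     Notes:
--     - you should infer from the input that relationships are two-way:
--       if given a pair (x,y), then assume that y is a friend of x, and x is
--       a friend of y
--     - no own-relationships: ignore pairs of the form (x, x)
--     """
--     directory = dict()
--
--     for pair_friends in pairs:
--         friend1 = pair_friends[0]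
--         friend2 = pair_friends[1]
--
--         if friend1 == friend2:
--             continue
--
--         friends_tuples = [(friend1, friend2), (friend2, friend1)]
--
--         for friend_tuple in friends_tuples:
--             if friend_tuple[0] not in directory.keys():
--                 directory[friend_tuple[0]] = {friend_tuple[1]}
--             if friend_tuple[1] not in directory[friend_tuple[0]]:
--                 directory[friend_tuple[0]].add(friend_tuple[1])
--
--     return directory
-- ===== SOURCE B (Python) =====
-- def make_friends_directory(pairs):
--     # Inverted decomposition: first collect every person appearing in a
--     # non-self pair (first-appearance order), then compute each person's
--     # friend set by an independent scan over all pairs.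
--     persons = []
--     for a, b in pairs:
--         if a != b:
--             if a not in persons:
--                 persons.append(a)
--             if b not in persons:
--                 persons.append(b)
--     directory = {}
--     for p in persons:
--         friends = set()
--         for a, b in pairs:
--             if a == b:
--                 continue
--             if a == p:
--                 friends.add(b)
--             elif b == p:
--                 friends.add(a)
--         directory[p] = friends
--     return directory
-- ===== Notes on version B (the rewrite author's own statement) =====
-- stated objective: alternative
-- what changed: B inverts the loop nesting: it first collects the ordered set of persons occurring in non-self pairs, then builds each person's friend set by an independent full scan of the pairs list, instead of A's single incremental dict-of-sets update.
import Mathlib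
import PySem

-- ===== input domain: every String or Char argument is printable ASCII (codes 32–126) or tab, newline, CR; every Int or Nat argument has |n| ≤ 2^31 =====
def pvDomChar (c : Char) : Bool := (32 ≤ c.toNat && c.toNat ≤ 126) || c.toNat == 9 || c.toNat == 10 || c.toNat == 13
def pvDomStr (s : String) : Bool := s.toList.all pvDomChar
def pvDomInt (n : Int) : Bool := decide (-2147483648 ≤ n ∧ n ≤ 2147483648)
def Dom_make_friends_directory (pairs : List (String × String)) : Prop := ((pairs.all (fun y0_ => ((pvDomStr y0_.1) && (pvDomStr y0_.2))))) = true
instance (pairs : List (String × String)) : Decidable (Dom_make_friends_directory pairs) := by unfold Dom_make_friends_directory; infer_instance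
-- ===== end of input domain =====

-- B inverts A's single incremental dict build into: collect persons once, then one full
-- scan of the pairs per person (alternative decomposition, not faster).

-- ===== PORT A =====
-- literal transliteration of A: one pass over pairs, incrementally updating a dict of sets;
-- 'directory[k]' after the guaranteed-present check is ported as getD with an unused default.
def make_friends_directory (pairs : List (String × String)) : List (String × List String) :=
  (pairs.foldl (fun directory pair_friends =>
      let friend1 := pair_friends.1
      let friend2 := pair_friends.2
      if friend1 = friend2 then directory
      else
        [(friend1, friend2), (friend2, friend1)].foldl (fun directory friend_tuple =>
          let directory :=
            if directory.contains friend_tuple.1 then directory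
            else directory.insert friend_tuple.1 (PySem.Set.ofList [friend_tuple.2])
          if PySem.Set.contains (directory.getD friend_tuple.1 PySem.Set.empty) friend_tuple.2 then
            directory
          else
            directory.insert friend_tuple.1
              (PySem.Set.add (directory.getD friend_tuple.1 PySem.Set.empty) friend_tuple.2))
          directory)
    PySem.Dict.empty).items

-- ===== PORT B =====
-- B-side helpers: ordered person collection, and the per-person scan of all pairs.
def altPersons (pairs : List (String × String)) : List String :=
  pairs.foldl (fun persons ab =>
    if ab.1 = ab.2 then persons
    else
      let persons := if ab.1 ∈ persons then persons else persons ++ [ab.1]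
      if ab.2 ∈ persons then persons else persons ++ [ab.2]) []

def altFriends (pairs : List (String × String)) (p : String) : List String :=
  pairs.foldl (fun friends ab =>
    if ab.1 = ab.2 then friends
    else if ab.1 = p then PySem.Set.add friends ab.2
    else if ab.2 = p then PySem.Set.add friends ab.1
    else friends) PySem.Set.empty

def make_friends_directory_alt (pairs : List (String × String)) : List (String × List String) :=
  ((altPersons pairs).foldl (fun directory p => directory.insert p (altFriends pairs p))
    PySem.Dict.empty).items

-- ===== PRECONDITION & SPEC =====
def Spec_make_friends_directory (pairs : List (String × String)) (out : List (String × List String)) : Prop := out = make_friends_directory_alt pairs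
instance (pairs : List (String × String)) (out : List (String × List String)) : Decidable (Spec_make_friends_directory pairs out) := by unfold Spec_make_friends_directory; infer_instance

-- ===== CLAIM (what is proved, stated in full; the proofs are below) =====
def Claim_equal_make_friends_directory : Prop := ∀ (pairs : List (String × String)), Dom_make_friends_directory pairs → Spec_make_friends_directory pairs (make_friends_directory pairs)

-- ===== LEMMAS AND PROOFS =====

-- A's inner two-iteration loop body, as a helper for the proofs.
def addE (d : PySem.Dict String (List String)) (x y : String) : PySem.Dict String (List String) :=
  let d := if d.contains x then d else d.insert x (PySem.Set.ofList [y])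
  if PySem.Set.contains (d.getD x PySem.Set.empty) y then d
  else d.insert x (PySem.Set.add (d.getD x PySem.Set.empty) y)

lemma make_friends_directory_eq (pairs : List (String × String)) :
    make_friends_directory pairs =
      (pairs.foldl (fun d ab => if ab.1 = ab.2 then d else addE (addE d ab.1 ab.2) ab.2 ab.1)
        PySem.Dict.empty).items := rfl

lemma contains_map (ps : List String) (F : String → List String) (x : String) :
    (PySem.Dict.mk (ps.map fun p => (p, F p))).contains x = decide (x ∈ ps) := by
  induction ps with
  | nil => simp [PySem.Dict.contains]
  | cons q qs ih =>
      simp only [PySem.Dict.contains, List.map_cons, List.any_cons] at ih ⊢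
      rw [ih]
      by_cases h : q = x
      · subst h; simp
      · have h2 : ¬ x = q := fun hh => h hh.symm
        simp [h, h2]

lemma get?_map (ps : List String) (F : String → List String) (x : String) (hx : x ∈ ps) :
    (PySem.Dict.mk (ps.map fun p => (p, F p))).get? x = some (F x) := by
  induction ps with
  | nil => simp at hx
  | cons q qs ih =>
      by_cases h : q = x
      · subst h; simp [PySem.Dict.get?]
      · have hx' : x ∈ qs := by
          rcases List.mem_cons.mp hx with h' | h'
          · exact absurd h'.symm h
          · exact h'
        simpa [PySem.Dict.get?, beq_iff_eq, h] using ih hx'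

lemma addE_items (ps : List String) (F G : String → List String) (x y : String)
    (hG1 : ∀ p, p ≠ x → G p = F p)
    (hG2 : G x = if x ∈ ps then PySem.Set.add (F x) y else [y]) :
    (addE (PySem.Dict.mk (ps.map fun p => (p, F p))) x y).items =
      (if x ∈ ps then ps else ps ++ [x]).map (fun p => (p, G p)) := by
  by_cases hx : x ∈ ps
  · simp only [addE, contains_map, hx, decide_true, if_true]
    have hget : (PySem.Dict.mk (ps.map fun p => (p, F p))).getD x PySem.Set.empty = F x := by
      simp [PySem.Dict.getD, get?_map ps F x hx]
    rw [hget]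
    by_cases hy : PySem.Set.contains (F x) y = true
    · simp only [hy, if_true]
      refine List.map_congr_left (fun p _ => ?_)
      by_cases hpx : p = x
      · subst hpx
        have hc : y ∈ F p := by simpa [PySem.Set.contains] using hy
        simp [hG2, hx, PySem.Set.add, hc]
      · simp [hG1 p hpx]
    · simp only [hy, PySem.Dict.insert, contains_map, hx, decide_true, if_true,
        List.map_map]
      refine List.map_congr_left (fun p _ => ?_)
      by_cases hpx : p = x
      · subst hpx
        simp [hG2, hx, Function.comp]
      · simp [Function.comp, beq_iff_eq, hpx, hG1 p hpx]
  · have hofl : PySem.Set.ofList [y] = [y] := rfl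
    simp only [addE, contains_map, hx, decide_false, if_false, PySem.Dict.insert, hofl]
    have hcon : ((PySem.Dict.mk (ps.map fun p => (p, F p))).items.any fun p => p.1 == x) = false := by
      have := contains_map ps F x
      simpa [PySem.Dict.contains, hx] using this
    simp only [PySem.Dict.contains, Bool.false_eq_true, if_false]
    have hget : (PySem.Dict.mk ((ps.map fun p => (p, F p)) ++ [(x, [y])])).getD x PySem.Set.empty
        = [y] := by
      have hmk : (PySem.Dict.mk ((ps.map fun p => (p, F p)) ++ [(x, [y])]))
          = PySem.Dict.mk ((ps ++ [x]).map fun p => (p, if p = x then [y] else F p)) := by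
        simp only [List.map_append, List.map_cons, List.map_nil]
        congr 1
        refine congrArg (· ++ _) (List.map_congr_left fun p hp => ?_)
        have hne : p ≠ x := fun h => hx (h ▸ hp)
        simp [hne]
      rw [hmk, PySem.Dict.getD, get?_map (ps ++ [x]) _ x (by simp)]
      simp
    rw [hget]
    have hyy : PySem.Set.contains ([y] : List String) y = true := by
      simp [PySem.Set.contains]
    simp only [hyy, if_true]
    simp only [List.map_append, List.map_cons, List.map_nil, hG2, hx, if_false]
    refine congrArg (· ++ _) (List.map_congr_left fun p hp => ?_)
    have hne : p ≠ x := fun h => hx (h ▸ hp)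
    simp [hG1 p hne]

-- B's dict build over fresh, distinct keys is just a map.
lemma foldl_insert_items (f : String → List String) :
    ∀ (ps : List String) (d : PySem.Dict String (List String)),
      ps.Nodup → (∀ p ∈ ps, d.contains p = false) →
      (ps.foldl (fun d p => d.insert p (f p)) d).items = d.items ++ ps.map (fun p => (p, f p)) := by
  intro ps
  induction ps with
  | nil => intro d _ _; simp
  | cons q qs ih =>
      intro d hnd hfresh
      have hq : d.contains q = false := hfresh q (by simp)
      have hstep : d.insert q (f q) = PySem.Dict.mk (d.items ++ [(q, f q)]) := by
        simp [PySem.Dict.insert, hq]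
      have hfresh' : ∀ p ∈ qs, (PySem.Dict.mk (d.items ++ [(q, f q)])).contains p = false := by
        intro p hp
        have hpq : q ≠ p := fun h => (List.nodup_cons.mp hnd).1 (h ▸ hp)
        have hdp := hfresh p (by simp [hp])
        simp [PySem.Dict.contains, beq_iff_eq, hpq] at hdp ⊢
        exact hdp
      simp only [List.foldl_cons, hstep]
      rw [ih _ (List.nodup_cons.mp hnd).2 hfresh']
      simp

-- the per-pair steps of B's two helpers (foldl over a snoc), with lets flattened
lemma altPersons_append (L : List (String × String)) (ab : String × String) :
    altPersons (L ++ [ab]) =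
      (if ab.1 = ab.2 then altPersons L
       else
         if ab.2 ∈ (if ab.1 ∈ altPersons L then altPersons L else altPersons L ++ [ab.1]) then
           (if ab.1 ∈ altPersons L then altPersons L else altPersons L ++ [ab.1])
         else
           (if ab.1 ∈ altPersons L then altPersons L else altPersons L ++ [ab.1]) ++ [ab.2]) := by
  simp [altPersons, List.foldl_append]

lemma altFriends_append (L : List (String × String)) (ab : String × String) (p : String) :
    altFriends (L ++ [ab]) p =
      (if ab.1 = ab.2 then altFriends L p
       else if ab.1 = p then PySem.Set.add (altFriends L p) ab.2
       else if ab.2 = p then PySem.Set.add (altFriends L p) ab.1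
       else altFriends L p) := by
  simp [altFriends, List.foldl_append]

-- the main invariant, by induction from the right over the pairs list
lemma main_invariant (pairs : List (String × String)) :
    (pairs.foldl (fun d ab => if ab.1 = ab.2 then d else addE (addE d ab.1 ab.2) ab.2 ab.1)
        PySem.Dict.empty).items =
      (altPersons pairs).map (fun p => (p, altFriends pairs p))
    ∧ (∀ p, p ∉ altPersons pairs → altFriends pairs p = [])
    ∧ (altPersons pairs).Nodup := by
  induction pairs using List.reverseRecOn with
  | nil =>
      exact ⟨rfl, fun p _ => rfl, List.nodup_nil⟩
  | append_singleton L ab IH =>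
      obtain ⟨hitems, hout, hnd⟩ := IH
      rw [List.foldl_append, List.foldl_cons, List.foldl_nil, altPersons_append]
      simp only [altFriends_append]
      by_cases hab : ab.1 = ab.2
      · simp only [hab, if_true]
        exact ⟨hitems, hout, hnd⟩
      · simp only [hab, if_false]
        set P := altPersons L with hP
        set F := altFriends L with hF
        set P₁ := if ab.1 ∈ P then P else P ++ [ab.1] with hP₁
        set F₁ := fun p => if p = ab.1 then (if ab.1 ∈ P then PySem.Set.add (F ab.1) ab.2 else [ab.2]) else F p with hF₁
        set P₂ := if ab.2 ∈ P₁ then P₁ else P₁ ++ [ab.2] with hP₂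
        set F₂ := fun p => if p = ab.2 then (if ab.2 ∈ P₁ then PySem.Set.add (F₁ ab.2) ab.1 else [ab.1]) else F₁ p with hF₂
        have hsub1 : ∀ q, q ∈ P → q ∈ P₁ := by
          intro q hq; rw [hP₁]; split <;> simp [hq]
        have hsub2 : ∀ q, q ∈ P₁ → q ∈ P₂ := by
          intro q hq; rw [hP₂]; split <;> simp [hq]
        have ha1 : ab.1 ∈ P₁ := by
          rw [hP₁]; split
          · assumption
          · simp
        have hb2 : ab.2 ∈ P₂ := by
          rw [hP₂]; split
          · assumption
          · simp
        have hd : (List.foldl (fun d ab => if ab.1 = ab.2 then d else addE (addE d ab.1 ab.2) ab.2 ab.1) PySem.Dict.empty L) = PySem.Dict.mk (P.map fun p => (p, F p)) := by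
          apply PySem.Dict.ext; exact hitems
        have h1 : (addE (PySem.Dict.mk (P.map fun p => (p, F p))) ab.1 ab.2).items
            = P₁.map (fun p => (p, F₁ p)) := by
          rw [hP₁]
          exact addE_items P F F₁ ab.1 ab.2 (fun p hp => by simp [hF₁, hp]) (by simp [hF₁])
        have hd1 : addE (PySem.Dict.mk (P.map fun p => (p, F p))) ab.1 ab.2
            = PySem.Dict.mk (P₁.map fun p => (p, F₁ p)) := by
          apply PySem.Dict.ext; exact h1
        have h2 : (addE (PySem.Dict.mk (P₁.map fun p => (p, F₁ p))) ab.2 ab.1).items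
            = P₂.map (fun p => (p, F₂ p)) := by
          rw [hP₂]
          exact addE_items P₁ F₁ F₂ ab.2 ab.1 (fun p hp => by simp [hF₂, hp]) (by simp [hF₂])
        -- F₂ agrees pointwise with B's snoc-step of the friends function
        have hFstep : ∀ p, F₂ p =
            (if ab.1 = p then PySem.Set.add (F p) ab.2
             else if ab.2 = p then PySem.Set.add (F p) ab.1
             else F p) := by
          intro p
          by_cases hp2 : p = ab.2
          · rw [hp2]
            have hne : ¬ ab.2 = ab.1 := fun h => hab h.symm
            by_cases hmem : ab.2 ∈ P₁
            · simp [hF₂, hF₁, hne, hab, hmem]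
            · have h0 : F ab.2 = [] := hout _ (fun h => hmem (hsub1 _ h))
              simp [hF₂, hF₁, hab, hmem, h0]
          · by_cases hp1 : p = ab.1
            · rw [hp1]
              by_cases hmem : ab.1 ∈ P
              · simp [hF₂, hF₁, hab, hmem]
              · simp [hF₂, hF₁, hab, hmem, hout _ hmem]
            · have hne1 : ¬ ab.1 = p := fun h => hp1 h.symm
              have hne2 : ¬ ab.2 = p := fun h => hp2 h.symm
              simp [hF₂, hp2, hF₁, hp1, hne1, hne2]
        refine ⟨?_, ?_, ?_⟩
        · rw [hd, hd1, h2]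
          exact List.map_congr_left (fun p _ => by rw [hFstep p])
        · intro p hp
          have hpne1 : ¬ ab.1 = p := fun h => hp (h ▸ hsub2 _ ha1)
          have hpne2 : ¬ ab.2 = p := fun h => hp (h ▸ hb2)
          have hpP : p ∉ P := fun h => hp (hsub2 p (hsub1 p h))
          simp [hpne1, hpne2, hout p hpP]
        · have snoc_nodup : ∀ (l : List String) (x : String), l.Nodup → x ∉ l → (l ++ [x]).Nodup := by
            intro l x hl hx
            exact List.pairwise_append.mpr ⟨hl, List.pairwise_singleton _ _,
              fun a ha b hb => by simp at hb; subst hb; exact fun e => hx (e ▸ ha)⟩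
          have hnd1 : P₁.Nodup := by
            rw [hP₁]; split
            · exact hnd
            · next h => exact snoc_nodup _ _ hnd h
          rw [hP₂]; split
          · exact hnd1
          · next h => exact snoc_nodup _ _ hnd1 h

-- ===== VERDICT (by name: the statement is the Claim_ definition above) =====
theorem make_friends_directory_spec : Claim_equal_make_friends_directory := by
  intro pairs _
  obtain ⟨hitems, _, hnd⟩ := main_invariant pairs
  show make_friends_directory pairs = make_friends_directory_alt pairs
  rw [make_friends_directory_eq, hitems, make_friends_directory_alt]
  rw [foldl_insert_items (altFriends pairs) (altPersons pairs) PySem.Dict.empty hnd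
    (fun p _ => by simp [PySem.Dict.contains, PySem.Dict.empty])]
  simp [PySem.Dict.empty]
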